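-- pv_equiv track=rewrite | github.com/juanelviztoo/flask-cryptosystem | cipher/ciphers.py | otp_decrypt_text
-- ===== SOURCE A (Python) =====
-- def otp_decrypt_text(ciphertext, keytext):
--     """
--     OTP decryption (alphabet letters only, non-letters removed).
--     - Only alphabet letters are decrypted
--     - Non-letters in ciphertext are ignored (not included in output)
--     - Uses letters from keytext only
--     - Key must have at least as many letters as ciphertext letters
--     """
--     key_letters = [ch.upper() for ch in keytext if ch.isalpha()]
--     letters_needed = sum(1 for ch in ciphertext if ch.isalpha())
--     if len(key_letters) < letters_needed:
--         raise ValueError(f'Key file shorter than ciphertext for OTP (need at least {letters_needed} letters)')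
--
--     out = []
--     ki = 0
--     for ch in ciphertext:
--         if ch.isalpha():
--             c_idx = ord(ch.upper()) - ord('A')
--             k_idx = ord(key_letters[ki]) - ord('A')
--             res_idx = (c_idx - k_idx) % 26
--             res_ch = chr(res_idx + ord('A'))
--             if ch.islower():
--                 res_ch = res_ch.lower()
--             out.append(res_ch)
--             ki += 1
--         # else: skip non-alpha (do not append)
--
--     return ''.join(out)
-- ===== SOURCE B (Python) =====
-- def otp_decrypt_text(ciphertext, keytext):
--     U = 'ABCDEFGHIJKLMNOPQRSTUVWXYZ'
--     key_letters = [ch.upper() for ch in keytext if ch.isalpha()]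
--     cipher_letters = [ch for ch in ciphertext if ch.isalpha()]
--     if len(key_letters) < len(cipher_letters):
--         raise ValueError(f'Key file shorter than ciphertext for OTP (need at least {len(cipher_letters)} letters)')
--     # For each key letter K (shift i), decryption is the monoalphabetic substitution
--     # that maps the rotated alphabet U[i:]+U[:i] (both cases) back to U: no per-character
--     # modular arithmetic, just 26 precomputed translation tables.
--     tables = {}
--     for i, k in enumerate(U):
--         rot = U[i:] + U[:i]
--         tables[k] = str.maketrans(rot + rot.lower(), U + U.lower())
--     return ''.join(c.translate(tables[k]) for c, k in zip(cipher_letters, key_letters))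
-- ===== Notes on version B (the rewrite author's own statement) =====
-- stated objective: alternative
-- what changed: B precomputes 26 rotated-alphabet substitution tables (str.maketrans dicts) and decrypts each letter by a table lookup via str.translate, instead of A's per-character ord/mod arithmetic with a stateful key index.
import Mathlib
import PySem

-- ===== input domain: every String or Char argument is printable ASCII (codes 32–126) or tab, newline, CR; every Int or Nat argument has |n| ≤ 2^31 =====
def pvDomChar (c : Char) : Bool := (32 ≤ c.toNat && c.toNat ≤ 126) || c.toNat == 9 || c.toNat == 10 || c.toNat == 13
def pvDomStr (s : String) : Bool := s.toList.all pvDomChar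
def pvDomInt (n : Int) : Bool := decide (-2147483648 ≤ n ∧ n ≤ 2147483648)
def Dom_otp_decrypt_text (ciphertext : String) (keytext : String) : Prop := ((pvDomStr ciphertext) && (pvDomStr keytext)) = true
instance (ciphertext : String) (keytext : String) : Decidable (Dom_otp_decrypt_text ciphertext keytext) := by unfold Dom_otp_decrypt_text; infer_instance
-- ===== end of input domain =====

-- B replaces A's per-character modular arithmetic and stateful key counter by 26 precomputed
-- rotated-alphabet substitution tables (str.maketrans-style dictionaries) applied per letter
-- (objective: alternative; return value only).

-- ===== PORT A =====
-- per-letter decryption exactly as A's loop body computes it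
def pvDecA (ch kch : Char) : Char :=
  let c_idx : Int := ((PySem.Chars.upperChar ch).toNat : Int) - 65
  let k_idx : Int := (kch.toNat : Int) - 65
  let res_idx : Int := PySem.Int.mod (c_idx - k_idx) 26
  let res_ch : Char := Char.ofNat (res_idx + 65).toNat
  if PySem.Chars.islower ch then PySem.Chars.lowerChar res_ch else res_ch

def otp_decrypt_text (ciphertext : String) (keytext : String) : String :=
  let key_letters := (keytext.toList.filter PySem.Chars.isalpha).map PySem.Chars.upperChar
  let letters_needed := ciphertext.toList.countP PySem.Chars.isalpha
  if key_letters.length < letters_needed then ""   -- Python raises ValueError here (excluded by Pre_)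
  else
    let st := ciphertext.toList.foldl
      (fun (st : List Char × Nat) ch =>
        if PySem.Chars.isalpha ch then
          (st.1 ++ [pvDecA ch (key_letters.getD st.2 'A')], st.2 + 1)  -- index always in range after the guard
        else st) ([], 0)
    String.ofList st.1

-- ===== PORT B =====
def pvU : List Char := "ABCDEFGHIJKLMNOPQRSTUVWXYZ".toList

-- Source B's `tables`: for each key letter k (shift i), the str.maketrans dict mapping the
-- rotated alphabet U[i:]+U[:i] (both cases) back to U (both cases).
def pvTables : PySem.Dict Char (PySem.Dict Char Char) :=
  (PySem.List.enumerate pvU).foldl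
    (fun t p =>
      let i := p.1.toNat   -- enumerate indices are ≥ 0, so toNat is exact
      let rot := pvU.drop i ++ pvU.take i
      t.insert p.2 (PySem.Dict.ofList
        ((rot ++ rot.map PySem.Chars.lowerChar).zip (pvU ++ pvU.map PySem.Chars.lowerChar))))
    PySem.Dict.empty

-- c.translate(tables[k]): chars absent from the table pass through unchanged;
-- tables[k] itself always exists for the k reached here (KeyError unreachable).
def pvTranslate (c : Char) (k : Char) : Char :=
  PySem.Dict.getD ((PySem.Dict.get? pvTables k).getD PySem.Dict.empty) c c

def otp_decrypt_text_alt (ciphertext : String) (keytext : String) : String :=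
  let key_letters := (keytext.toList.filter PySem.Chars.isalpha).map PySem.Chars.upperChar
  let cipher_letters := ciphertext.toList.filter PySem.Chars.isalpha
  if key_letters.length < cipher_letters.length then ""  -- Python raises ValueError here (excluded by Pre_)
  else String.ofList ((cipher_letters.zip key_letters).map fun p => pvTranslate p.1 p.2)

-- ===== PRECONDITION & SPEC =====
-- Pre_ excludes exactly the inputs on which A raises ValueError (fewer key letters than ciphertext letters).
def Pre_otp_decrypt_text (ciphertext : String) (keytext : String) : Prop :=
  ciphertext.toList.countP PySem.Chars.isalpha ≤ keytext.toList.countP PySem.Chars.isalpha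
instance (ciphertext : String) (keytext : String) : Decidable (Pre_otp_decrypt_text ciphertext keytext) := by
  unfold Pre_otp_decrypt_text; infer_instance

def pvWitness_otp_decrypt_text : String × String := ("Hi, there!", "SECRETKEYXYZ")

def Spec_otp_decrypt_text (ciphertext : String) (keytext : String) (out : String) : Prop := out = otp_decrypt_text_alt ciphertext keytext
instance (ciphertext : String) (keytext : String) (out : String) : Decidable (Spec_otp_decrypt_text ciphertext keytext out) := by unfold Spec_otp_decrypt_text; infer_instance

-- ===== CLAIM (what is proved, stated in full; the proofs are below) =====
def Claim_equal_otp_decrypt_text : Prop := ∀ (ciphertext : String) (keytext : String), Dom_otp_decrypt_text ciphertext keytext → Pre_otp_decrypt_text ciphertext keytext → Spec_otp_decrypt_text ciphertext keytext (otp_decrypt_text ciphertext keytext)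

-- ===== LEMMAS AND PROOFS =====

-- the 52 ASCII letters / 26 uppercase letters, as enumerable lists
def pvUppersE : List Char := (List.range' 65 26).map Char.ofNat
def pvLettersE : List Char := (List.range' 65 26).map Char.ofNat ++ (List.range' 97 26).map Char.ofNat

theorem pv_mem_of_bounds (c : Char) (lo n : Nat) (h1 : lo ≤ c.toNat) (h2 : c.toNat < lo + n) :
    c ∈ (List.range' lo n).map Char.ofNat :=
  List.mem_map.mpr ⟨c.toNat, List.mem_range'_1.mpr ⟨h1, h2⟩, Char.ofNat_toNat c⟩

theorem pv_isupper_bounds (c : Char) (h : PySem.Chars.isupper c = true) :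
    65 ≤ c.toNat ∧ c.toNat ≤ 90 := by
  simp only [PySem.Chars.isupper, Bool.and_eq_true, decide_eq_true_eq, Char.le_def,
    UInt32.le_iff_toNat_le] at h
  have ha : 'A'.val.toNat = 65 := by decide
  have hz : 'Z'.val.toNat = 90 := by decide
  rw [ha, hz] at h
  exact h

theorem pv_islower_bounds (c : Char) (h : PySem.Chars.islower c = true) :
    97 ≤ c.toNat ∧ c.toNat ≤ 122 := by
  simp only [PySem.Chars.islower, Bool.and_eq_true, decide_eq_true_eq, Char.le_def,
    UInt32.le_iff_toNat_le] at h
  have ha : 'a'.val.toNat = 97 := by decide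
  have hz : 'z'.val.toNat = 122 := by decide
  rw [ha, hz] at h
  exact h

theorem pv_mem_letters (c : Char) (h : PySem.Chars.isalpha c = true) : c ∈ pvLettersE := by
  simp only [PySem.Chars.isalpha, Bool.or_eq_true] at h
  rcases h with h | h
  · obtain ⟨h1, h2⟩ := pv_isupper_bounds c h
    exact List.mem_append_left _ (pv_mem_of_bounds c 65 26 h1 (by omega))
  · obtain ⟨h1, h2⟩ := pv_islower_bounds c h
    exact List.mem_append_right _ (pv_mem_of_bounds c 97 26 h1 (by omega))

theorem pv_mem_uppers (k : Char) (h : PySem.Chars.isalpha k = true) :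
    PySem.Chars.upperChar k ∈ pvUppersE := by
  simp only [PySem.Chars.isalpha, Bool.or_eq_true] at h
  unfold PySem.Chars.upperChar
  rcases h with h | h
  · obtain ⟨h1, h2⟩ := pv_isupper_bounds k h
    rw [if_neg]
    · exact pv_mem_of_bounds k 65 26 h1 (by omega)
    · intro hc
      obtain ⟨h3, _⟩ := pv_islower_bounds k hc
      omega
  · obtain ⟨h1, h2⟩ := pv_islower_bounds k h
    rw [if_pos h]
    have hn : (Char.ofNat (k.toNat - 32)).toNat = k.toNat - 32 := by
      simp [Char.toNat_ofNat]
      omega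
    exact pv_mem_of_bounds _ 65 26 (by omega) (by omega)

-- the finite check: on every letter/key-letter pair the table lookup equals A's arithmetic
set_option maxRecDepth 100000 in
theorem pv_pointwise_all :
    (pvLettersE.all fun c => pvUppersE.all fun k => pvTranslate c k == pvDecA c k) = true := by
  decide

theorem pv_pointwise (c k : Char) (hc : c ∈ pvLettersE) (hk : k ∈ pvUppersE) :
    pvTranslate c k = pvDecA c k := by
  have h := pv_pointwise_all
  rw [List.all_eq_true] at h
  have h2 := h c hc
  rw [List.all_eq_true] at h2
  exact eq_of_beq (h2 k hk)

theorem pvLoopA_eq (kl : List Char) :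
    ∀ (cs : List Char) (acc : List Char) (ki : Nat),
      ki + cs.countP PySem.Chars.isalpha ≤ kl.length →
      (cs.foldl (fun (st : List Char × Nat) ch =>
          if PySem.Chars.isalpha ch then
            (st.1 ++ [pvDecA ch (kl.getD st.2 'A')], st.2 + 1)
          else st) (acc, ki)).1
        = acc ++ ((cs.filter PySem.Chars.isalpha).zip (kl.drop ki)).map (fun p => pvDecA p.1 p.2) := by
  intro cs
  induction cs with
  | nil => intro acc ki _; simp
  | cons ch rest ih =>
    intro acc ki hb
    by_cases h : PySem.Chars.isalpha ch = true
    · have hcnt : (ch :: rest).countP PySem.Chars.isalpha = rest.countP PySem.Chars.isalpha + 1 := by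
        simp [h]
      have hki : ki < kl.length := by omega
      have hdrop : kl.drop ki = kl[ki] :: kl.drop (ki + 1) := List.drop_eq_getElem_cons hki
      have hrec := ih (acc ++ [pvDecA ch (kl.getD ki 'A')]) (ki + 1) (by omega)
      simp only [List.foldl_cons]
      rw [if_pos h, hrec, hdrop]
      simp [h, List.append_assoc, List.getD, List.getElem?_eq_getElem hki]
      rw [hdrop, List.zip_cons_cons, List.map_cons]
    · have hcnt : (ch :: rest).countP PySem.Chars.isalpha = rest.countP PySem.Chars.isalpha := by
        simp [h]
      have hrec := ih acc ki (by omega)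
      simp only [List.foldl_cons]
      rw [if_neg h, hrec]
      simp [h]

-- ===== VERDICT (by name: the statement is the Claim_ definition above) =====
theorem otp_decrypt_text_spec : Claim_equal_otp_decrypt_text := by
  intro c k _ hpre
  unfold Spec_otp_decrypt_text otp_decrypt_text otp_decrypt_text_alt
  have hklen : ((k.toList.filter PySem.Chars.isalpha).map PySem.Chars.upperChar).length
      = k.toList.countP PySem.Chars.isalpha := by
    simp [List.countP_eq_length_filter]
  have hclen : (c.toList.filter PySem.Chars.isalpha).length
      = c.toList.countP PySem.Chars.isalpha := by
    simp [List.countP_eq_length_filter]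
  have hguard : ¬ ((k.toList.filter PySem.Chars.isalpha).map PySem.Chars.upperChar).length
      < c.toList.countP PySem.Chars.isalpha := by
    unfold Pre_otp_decrypt_text at hpre; omega
  simp only [hclen, if_neg hguard]
  have hA := pvLoopA_eq ((k.toList.filter PySem.Chars.isalpha).map PySem.Chars.upperChar)
      c.toList [] 0 (by omega)
  simp only [List.drop_zero, List.nil_append] at hA
  rw [hA]
  congr 1
  apply List.map_congr_left
  intro p hp
  obtain ⟨c0, k0⟩ := p
  have hmem := List.of_mem_zip hp
  have hc0 : PySem.Chars.isalpha c0 = true := List.of_mem_filter hmem.1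
  obtain ⟨k1, hk1, hk1e⟩ := List.mem_map.mp hmem.2
  have hk1a : PySem.Chars.isalpha k1 = true := List.of_mem_filter hk1
  exact (pv_pointwise c0 k0 (pv_mem_letters c0 hc0)
    (hk1e ▸ pv_mem_uppers k1 hk1a)).symm
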